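-- pv_equiv track=rewrite | github.com/whateverworks02/AoC_2025 | day11/logic.py | cnt_diff_paths_v1
-- ===== SOURCE A (Python) =====
-- from typing import List
--
-- def build_pool(grid: List[str]) -> dict:
--     pool = dict()
--     for line in grid:
--         cur, cons = line.split(":")
--         pool[cur] = cons.split(" ")
--     return pool
--
-- def cnt_diff_paths_v1(grid: List[str]) -> int:
--     source = "you"
--     tar = "out"
--     pool = build_pool(grid)
--     counter = dict()
--
--     def dfs(cur: str) -> int:
--         if cur == tar:
--             return 1
--         if cur in counter:
--             return counter[cur]
--         if cur not in pool:
--             return 0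
--         cnt = 0
--         for nxt in pool[cur]:
--             cnt += dfs(nxt)
--         counter[cur] = cnt
--         return cnt
--
--     return dfs(source)
-- ===== SOURCE B (Python) =====
-- from typing import List
--
-- def cnt_diff_paths_v1(grid: List[str]) -> int:
--     pool = {}
--     for line in grid:
--         cur, cons = line.split(":")
--         pool[cur] = cons.split(" ")
--     counts = {k: 0 for k in pool}
--     for _ in range(len(pool)):
--         counts = {k: sum(1 if n == "out" else counts.get(n, 0) for n in pool[k])
--                   for k in pool}
--     return counts.get("you", 0)
-- ===== Notes on version B (the rewrite author's own statement) =====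
-- stated objective: alternative
-- what changed: Replaces the recursive memoized DFS by an iterative Bellman-Ford-style fixed point: path counts for all nodes are recomputed bottom-up for len(pool) rounds, so there is no recursion (and no possible stack overflow).
import Mathlib
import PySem

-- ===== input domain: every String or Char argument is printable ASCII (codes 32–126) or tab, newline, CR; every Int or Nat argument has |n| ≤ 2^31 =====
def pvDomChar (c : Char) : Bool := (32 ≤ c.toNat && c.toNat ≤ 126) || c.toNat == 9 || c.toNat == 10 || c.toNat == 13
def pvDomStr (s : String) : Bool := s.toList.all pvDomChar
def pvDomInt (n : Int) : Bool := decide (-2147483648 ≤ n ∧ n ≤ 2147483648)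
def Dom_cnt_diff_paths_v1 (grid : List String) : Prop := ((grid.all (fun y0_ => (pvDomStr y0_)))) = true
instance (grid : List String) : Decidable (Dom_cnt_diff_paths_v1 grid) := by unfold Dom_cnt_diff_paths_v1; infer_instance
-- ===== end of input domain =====

-- B replaces A's recursive memoized DFS by an iterative Bellman-Ford-style fixed point (no recursion); they agree on every grid with well-formed lines and no cycle reachable from "you" (elsewhere the Python A raises).

-- ===== PORT A =====
-- build_pool, shared verbatim by both Pythons (outside Pre_ a malformed line raises in Python; the port skips it)
def buildPool (grid : List String) : PySem.Dict String (List String) :=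
  grid.foldl (fun d line =>
    match PySem.Str.split? line ":" with
    | some [cur, cons] =>
      match PySem.Str.split? cons " " with
      | some parts => d.insert cur parts
      | _ => d
    | _ => d) PySem.Dict.empty

-- the inner dfs of A, with fuel as the standard totalization device (Pre_ guarantees fuel pool.size+1 is never exhausted); the for-loop is the foldl
def dfsA (pool : PySem.Dict String (List String)) :
    Nat → PySem.Dict String Int → String → PySem.Dict String Int × Int
  | 0, counter, _ => (counter, 0)
  | Nat.succ f, counter, cur =>
    if cur = "out" then (counter, 1)
    else
      match counter.get? cur with
      | some v => (counter, v)
      | none =>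
        match pool.get? cur with
        | none => (counter, 0)
        | some nxts =>
          let r := nxts.foldl
            (fun (st : PySem.Dict String Int × Int) nxt =>
              let p := dfsA pool f st.1 nxt
              (p.1, st.2 + p.2)) (counter, 0)
          (r.1.insert cur r.2, r.2)

def cnt_diff_paths_v1 (grid : List String) : Int :=
  let pool := buildPool grid
  (dfsA pool (pool.size + 1) PySem.Dict.empty "you").2

-- ===== PORT B =====
def valB (counts : PySem.Dict String Int) (n : String) : Int :=
  if n = "out" then 1 else counts.getD n 0

-- one round: counts = {k: sum(1 if n == "out" else counts.get(n, 0) for n in pool[k]) for k in pool}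
def roundB (pool : PySem.Dict String (List String)) (counts : PySem.Dict String Int) :
    PySem.Dict String Int :=
  pool.keys.foldl (fun d k => d.insert k ((pool.getD k []).map (valB counts)).sum) PySem.Dict.empty

def cnt_diff_paths_v1_alt (grid : List String) : Int :=
  let pool := buildPool grid
  let init := pool.keys.foldl (fun d k => d.insert k (0 : Int)) PySem.Dict.empty
  let counts := (List.range pool.size).foldl (fun c _ => roundB pool c) init
  counts.getD "you" 0

-- ===== PRECONDITION & SPEC =====
-- a ==> b within at most n edge steps in the pool graph
def reachB (pool : PySem.Dict String (List String)) : Nat → String → String → Bool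
  | 0, a, b => a == b
  | Nat.succ n, a, b => a == b || (pool.getD a []).any (fun c => reachB pool n c b)

-- k lies on a cycle: one outgoing edge, then back to k in ≤ K steps
def cycB (pool : PySem.Dict String (List String)) (K : Nat) (k : String) : Bool :=
  (pool.getD k []).any (fun c => reachB pool K c k)

-- Pre_ excludes exactly the inputs on which the Python A raises: a line without exactly one ':'
-- (ValueError in the unpacking split) or a cycle reachable from "you" (RecursionError).
def Pre_cnt_diff_paths_v1 (grid : List String) : Prop :=
  (grid.all (fun line => ((PySem.Str.split? line ":").getD []).length == 2)) = true ∧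
  ((buildPool grid).keys.all (fun k =>
      !(reachB (buildPool grid) (buildPool grid).size "you" k) ||
      !(cycB (buildPool grid) (buildPool grid).size k))) = true

instance (grid : List String) : Decidable (Pre_cnt_diff_paths_v1 grid) := by
  unfold Pre_cnt_diff_paths_v1; infer_instance

def pvWitness_cnt_diff_paths_v1 : List String := ["you:a b", "a:out", "b:a out"]

def Spec_cnt_diff_paths_v1 (grid : List String) (out : Int) : Prop := out = cnt_diff_paths_v1_alt grid
instance (grid : List String) (out : Int) : Decidable (Spec_cnt_diff_paths_v1 grid out) := by
  unfold Spec_cnt_diff_paths_v1; infer_instance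

-- ===== CLAIM (what is proved, stated in full; the proofs are below) =====
def Claim_equal_cnt_diff_paths_v1 : Prop := ∀ (grid : List String), Dom_cnt_diff_paths_v1 grid → Pre_cnt_diff_paths_v1 grid → Spec_cnt_diff_paths_v1 grid (cnt_diff_paths_v1 grid)

-- ===== LEMMAS AND PROOFS =====

-- the common mathematical reference: naive fueled path count (proof-only; a missing key gives getD [] and hence sum 0)
def plain (pool : PySem.Dict String (List String)) : Nat → String → Int
  | 0, _ => 0
  | Nat.succ f, cur =>
    if cur = "out" then 1
    else ((pool.getD cur []).map (fun n => plain pool f n)).sum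

def edgeP (pool : PySem.Dict String (List String)) (a b : String) : Prop :=
  b ∈ pool.getD a []

-- P is the (nodup) stack of ancestors of cur, nearest first, rooted at "you"
def PathOK (pool : PySem.Dict String (List String)) (P : List String) (cur : String) : Prop :=
  P.Nodup ∧ List.IsChain (fun x y => edgeP pool y x) (cur :: P) ∧ (cur :: P).getLast? = some "you"

theorem reachB_zero (pool : PySem.Dict String (List String)) (a b : String) :
    reachB pool 0 a b = (a == b) := rfl

theorem reachB_succ (pool : PySem.Dict String (List String)) (n : Nat) (a b : String) :
    reachB pool (n + 1) a b = (a == b || (pool.getD a []).any (fun c => reachB pool n c b)) := rfl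

theorem reachB_succ_of (pool : PySem.Dict String (List String)) (n : Nat) (a b : String)
    (h : reachB pool n a b = true) : reachB pool (n + 1) a b = true := by
  induction n generalizing a with
  | zero =>
    rw [reachB_zero] at h
    rw [reachB_succ, h, Bool.true_or]
  | succ n ih =>
    rw [reachB_succ] at h ⊢
    rcases Bool.or_eq_true_iff.mp h with h | h
    · rw [h, Bool.true_or]
    · rcases List.any_eq_true.mp h with ⟨c, hc, hr⟩
      exact Bool.or_eq_true_iff.mpr (Or.inr (List.any_eq_true.mpr ⟨c, hc, ih c hr⟩))

theorem reachB_of_le (pool : PySem.Dict String (List String)) {m n : Nat} (h : m ≤ n)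
    (a b : String) (hr : reachB pool m a b = true) : reachB pool n a b = true := by
  induction n with
  | zero =>
    obtain rfl : m = 0 := Nat.le_zero.mp h
    exact hr
  | succ n ih =>
    rcases Nat.lt_or_ge m (n + 1) with hlt | hge
    · exact reachB_succ_of pool n a b (ih (by omega))
    · obtain rfl : m = n + 1 := by omega
      exact hr

theorem reachB_refl (pool : PySem.Dict String (List String)) (n : Nat) (a : String) :
    reachB pool n a a = true := by
  cases n
  · rw [reachB_zero]; simp
  · rw [reachB_succ]; simp

theorem reachB_snoc (pool : PySem.Dict String (List String)) (n : Nat) (a b c : String)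
    (h : reachB pool n a b = true) (he : edgeP pool b c) : reachB pool (n + 1) a c = true := by
  induction n generalizing a with
  | zero =>
    rw [reachB_zero] at h
    have hab : a = b := by simpa using h
    subst hab
    rw [reachB_succ]
    exact Bool.or_eq_true_iff.mpr (Or.inr (List.any_eq_true.mpr ⟨c, he, reachB_refl pool 0 c⟩))
  | succ n ih =>
    rw [reachB_succ] at h
    rw [reachB_succ]
    rcases Bool.or_eq_true_iff.mp h with h | h
    · have hab : a = b := by simpa using h
      subst hab
      exact Bool.or_eq_true_iff.mpr
        (Or.inr (List.any_eq_true.mpr ⟨c, he, reachB_of_le pool (Nat.zero_le _) c c (reachB_refl pool 0 c)⟩))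
    · rcases List.any_eq_true.mp h with ⟨d, hd, hr⟩
      exact Bool.or_eq_true_iff.mpr (Or.inr (List.any_eq_true.mpr ⟨d, hd, ih d hr⟩))

-- every member of the tail reaches the head of a chain
theorem chain_reach (pool : PySem.Dict String (List String)) :
    ∀ (t : List String) (h : String),
      List.IsChain (fun x y => edgeP pool y x) (h :: t) →
      ∀ a ∈ t, reachB pool t.length a h = true := by
  intro t
  induction t with
  | nil => intro h _ a ha; simp at ha
  | cons b t' ih =>
    intro h hch a ha
    have hedge : edgeP pool b h := (List.isChain_cons_cons.mp hch).1
    have hch' : List.IsChain (fun x y => edgeP pool y x) (b :: t') := (List.isChain_cons_cons.mp hch).2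
    rcases List.mem_cons.mp ha with rfl | ha'
    · exact reachB_of_le pool (by simp) a h
        (reachB_snoc pool 0 a a h (reachB_refl pool 0 a) hedge)
    · exact reachB_snoc pool t'.length a b h (ih b hch' a ha') hedge

theorem chain_reach_head (pool : PySem.Dict String (List String)) (t : List String)
    (h : String) (hch : List.IsChain (fun x y => edgeP pool y x) (h :: t))
    (a : String) (ha : a ∈ h :: t) : reachB pool t.length a h = true := by
  rcases List.mem_cons.mp ha with rfl | ha'
  · exact reachB_of_le pool (Nat.zero_le _) _ _ (reachB_refl pool 0 _)
  · exact chain_reach pool t h hch a ha'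

theorem edgeP_mem_keys (pool : PySem.Dict String (List String)) (a b : String)
    (h : edgeP pool a b) : a ∈ pool.keys := by
  by_contra hnot
  have hn : pool.get? a = none := (PySem.Dict.get?_eq_none_iff_not_mem_keys pool a).mpr hnot
  have : pool.getD a [] = [] := PySem.Dict.getD_of_get?_eq_none pool [] hn
  rw [edgeP, this] at h
  simp at h

theorem pathOK_mem_keys (pool : PySem.Dict String (List String)) :
    ∀ (P : List String) (cur : String),
      List.IsChain (fun x y => edgeP pool y x) (cur :: P) →
      ∀ p ∈ P, p ∈ pool.keys := by
  intro P
  induction P with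
  | nil => intro cur _ p hp; simp at hp
  | cons q P' ih =>
    intro cur hch p hp
    have h1 : edgeP pool q cur := (List.isChain_cons_cons.mp hch).1
    have h2 : List.IsChain (fun x y => edgeP pool y x) (q :: P') := (List.isChain_cons_cons.mp hch).2
    rcases List.mem_cons.mp hp with rfl | hp'
    · exact edgeP_mem_keys pool p cur h1
    · exact ih q h2 p hp'

theorem keys_length_eq_size (pool : PySem.Dict String (List String)) :
    pool.keys.length = pool.size := by
  simp [PySem.Dict.keys, PySem.Dict.size]

theorem pathOK_length_le (pool : PySem.Dict String (List String)) (P : List String)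
    (cur : String) (hp : PathOK pool P cur) : P.length ≤ pool.size := by
  obtain ⟨hnd, hch, _⟩ := hp
  have hsub : P ⊆ pool.keys := fun p hp' => pathOK_mem_keys pool P cur hch p hp'
  calc P.length ≤ pool.keys.length := (List.subperm_of_subset hnd hsub).length_le
    _ = pool.size := keys_length_eq_size pool

-- the acyclicity half of Pre_, in usable form
def Acyc (pool : PySem.Dict String (List String)) : Prop :=
  ∀ k ∈ pool.keys, reachB pool pool.size "you" k = true → cycB pool pool.size k = false

theorem pathOK_not_mem (pool : PySem.Dict String (List String)) (hac : Acyc pool)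
    (P : List String) (cur : String) (hp : PathOK pool P cur)
    (l : List String) (hget : pool.get? cur = some l) : cur ∉ P := by
  intro hmem
  obtain ⟨hnd, hch, hlast⟩ := hp
  have hkey : cur ∈ pool.keys := by
    by_contra hnot
    simp [(PySem.Dict.get?_eq_none_iff_not_mem_keys pool cur).mpr hnot] at hget
  have hPle : P.length ≤ pool.size := pathOK_length_le pool P cur ⟨hnd, hch, hlast⟩
  -- "you" reaches cur within pool.size steps
  have hne : (cur :: P) ≠ [] := by simp
  have hyouL : (cur :: P).getLast hne = "you" := by
    rw [List.getLast?_eq_getLast hne] at hlast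
    exact Option.some.inj hlast
  have hyou_mem : "you" ∈ cur :: P := hyouL ▸ List.getLast_mem hne
  have hyou : reachB pool pool.size "you" cur = true :=
    reachB_of_le pool hPle _ _ (chain_reach_head pool P cur hch "you" hyou_mem)
  -- a cycle at cur: split P at the second occurrence of cur
  obtain ⟨P1, P2, hPeq⟩ := List.append_of_mem hmem
  have hch2 : List.IsChain (fun x y => edgeP pool y x) ((cur :: P1) ++ (cur :: P2)) := by
    rw [hPeq] at hch
    simpa using hch
  rw [List.isChain_append] at hch2
  obtain ⟨hchA, _, hmid⟩ := hch2
  have hneA : (cur :: P1) ≠ [] := by simp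
  set x := (cur :: P1).getLast hneA with hx
  have hedge : edgeP pool cur x := by
    refine hmid x ?_ cur (by simp [Option.mem_def])
    simp [Option.mem_def, List.getLast?_eq_getLast hneA, hx]
  have hxmem : x ∈ cur :: P1 := List.getLast_mem hneA
  have hP1le : P1.length ≤ pool.size := by
    have : P.length = P1.length + P2.length + 1 := by
      subst hPeq; rw [List.length_append, List.length_cons]; omega
    omega
  have hxreach : reachB pool pool.size x cur = true :=
    reachB_of_le pool hP1le _ _ (chain_reach_head pool P1 cur hchA x hxmem)
  have hcyc : cycB pool pool.size cur = true := by
    unfold cycB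
    exact List.any_eq_true.mpr ⟨x, hedge, hxreach⟩
  rw [hac cur hkey hyou] at hcyc
  exact Bool.false_ne_true hcyc

theorem pathOK_push (pool : PySem.Dict String (List String)) (hac : Acyc pool)
    (P : List String) (cur : String) (hp : PathOK pool P cur)
    (l : List String) (hget : pool.get? cur = some l) (nxt : String) (hn : nxt ∈ l) :
    PathOK pool (cur :: P) nxt := by
  obtain ⟨hnd, hch, hlast⟩ := hp
  have hgd : pool.getD cur [] = l := PySem.Dict.getD_of_get?_eq_some pool [] hget
  refine ⟨?_, ?_, ?_⟩
  · exact List.nodup_cons.mpr ⟨pathOK_not_mem pool hac P cur ⟨hnd, hch, hlast⟩ l hget, hnd⟩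
  · exact List.isChain_cons_cons.mpr ⟨by rw [edgeP, hgd]; exact hn, hch⟩
  · simpa using hlast

-- fuel-stability of plain along any valid ancestor path
theorem plain_stable (pool : PySem.Dict String (List String)) (hac : Acyc pool) :
    ∀ (f1 f2 : Nat) (P : List String) (cur : String), PathOK pool P cur →
      pool.size + 1 ≤ f1 + P.length → pool.size + 1 ≤ f2 + P.length →
      plain pool f1 cur = plain pool f2 cur := by
  intro f1
  induction f1 with
  | zero =>
    intro f2 P cur hp h1 _
    have := pathOK_length_le pool P cur hp
    omega
  | succ g1 ih =>
    intro f2 P cur hp h1 h2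
    have hPle := pathOK_length_le pool P cur hp
    cases f2 with
    | zero => omega
    | succ g2 =>
      simp only [plain]
      by_cases hout : cur = "out"
      · simp [hout]
      · simp only [if_neg hout]
        cases hget : pool.get? cur with
        | none =>
          simp [PySem.Dict.getD_of_get?_eq_none pool [] hget]
        | some l =>
          rw [PySem.Dict.getD_of_get?_eq_some pool [] hget]
          congr 1
          apply List.map_congr_left
          intro nxt hn
          exact ih g2 (cur :: P) nxt (pathOK_push pool hac P cur hp l hget nxt hn)
            (by simp only [List.length_cons]; omega) (by simp only [List.length_cons]; omega)

-- memo-table invariant of A's dfs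
def InvA (pool : PySem.Dict String (List String)) (counter : PySem.Dict String Int) : Prop :=
  ∀ k v, counter.get? k = some v → v = plain pool (pool.size + 1) k

theorem dfsA_correct (pool : PySem.Dict String (List String)) (hac : Acyc pool) :
    ∀ (f : Nat) (P : List String) (cur : String) (counter : PySem.Dict String Int),
      PathOK pool P cur → InvA pool counter → pool.size + 1 ≤ f + P.length →
      (dfsA pool f counter cur).2 = plain pool (pool.size + 1) cur ∧
      InvA pool (dfsA pool f counter cur).1 := by
  intro f
  induction f with
  | zero =>
    intro P cur counter hp _ hf
    have := pathOK_length_le pool P cur hp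
    omega
  | succ g ih =>
    intro P cur counter hp hinv hf
    by_cases hout : cur = "out"
    · subst hout
      simp only [dfsA]
      refine ⟨?_, hinv⟩
      simp [plain]
    · cases hhit : counter.get? cur with
      | some v =>
        simp only [dfsA, if_neg hout, hhit]
        exact ⟨hinv cur v hhit, hinv⟩
      | none =>
        cases hget : pool.get? cur with
        | none =>
          simp only [dfsA, if_neg hout, hhit, hget]
          refine ⟨?_, hinv⟩
          simp [plain, if_neg hout, PySem.Dict.getD_of_get?_eq_none pool [] hget]
        | some l =>
          have hgd : pool.getD cur [] = l := PySem.Dict.getD_of_get?_eq_some pool [] hget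
          have hpush : ∀ n ∈ l, PathOK pool (cur :: P) n :=
            fun n hn => pathOK_push pool hac P cur hp l hget n hn
          have hplain : plain pool (pool.size + 1) cur =
              (l.map (fun n => plain pool (pool.size + 1) n)).sum := by
            have h1 : plain pool (pool.size + 1) cur =
                (l.map (fun n => plain pool pool.size n)).sum := by
              simp only [plain, if_neg hout, hgd]
            rw [h1]
            congr 1
            apply List.map_congr_left
            intro n hn
            exact plain_stable pool hac pool.size (pool.size + 1) (cur :: P) n
              (hpush n hn) (by simp only [List.length_cons]; omega) (by simp only [List.length_cons]; omega)
          -- the for-loop over the successors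
          have loop : ∀ (l' : List String), (∀ n ∈ l', PathOK pool (cur :: P) n) →
              ∀ (c : PySem.Dict String Int) (s : Int), InvA pool c →
              (l'.foldl (fun (st : PySem.Dict String Int × Int) nxt =>
                  let p := dfsA pool g st.1 nxt
                  (p.1, st.2 + p.2)) (c, s)).2 =
                s + (l'.map (fun n => plain pool (pool.size + 1) n)).sum ∧
              InvA pool (l'.foldl (fun (st : PySem.Dict String Int × Int) nxt =>
                  let p := dfsA pool g st.1 nxt
                  (p.1, st.2 + p.2)) (c, s)).1 := by
            intro l'
            induction l' with
            | nil => intro _ c s hc; simpa using hc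
            | cons nxt rest ihl =>
              intro hall c s hc
              have hmain := ih (cur :: P) nxt c (hall nxt (by simp)) hc (by simp at hf ⊢; omega)
              have hrest := ihl (fun n hn => hall n (by simp [hn]))
                (dfsA pool g c nxt).1 (s + (dfsA pool g c nxt).2) hmain.2
              simp only [List.foldl_cons]
              refine ⟨?_, hrest.2⟩
              rw [hrest.1, hmain.1, List.map_cons, List.sum_cons]
              ring
          have hloop := loop l hpush counter 0 hinv
          simp only [dfsA, if_neg hout, hhit, hget]
          constructor
          · rw [hloop.1, hplain]
            ring
          · intro k v hkv
            rw [PySem.Dict.get?_insert] at hkv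
            by_cases hk : k = cur
            · rw [if_pos hk] at hkv
              subst hk
              rw [← Option.some.inj hkv, hloop.1, hplain]
              ring
            · rw [if_neg hk] at hkv
              exact hloop.2 k v hkv

-- lookup in a dict built by inserting g k at every k of ks
theorem get?_foldl_insert_fn (ks : List String) (g : String → Int) :
    ∀ (d : PySem.Dict String Int) (x : String),
      (ks.foldl (fun d k => d.insert k (g k)) d).get? x =
        if x ∈ ks then some (g x) else d.get? x := by
  induction ks with
  | nil => intro d x; simp
  | cons k ks' ih =>
    intro d x
    rw [List.foldl_cons, ih]
    by_cases hx : x ∈ ks'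
    · simp [hx]
    · rw [if_neg hx, PySem.Dict.get?_insert]
      by_cases hxk : x = k
      · simp [hxk]
      · simp [hxk, hx]

-- the round invariant of B: after i rounds every key ≠ "out" holds plain (i+1)
def GoodB (pool : PySem.Dict String (List String)) (i : Nat) (d : PySem.Dict String Int) : Prop :=
  (∀ k, k ∉ pool.keys → d.get? k = none) ∧
  (∀ k, k ∈ pool.keys → k ≠ "out" → d.get? k = some (plain pool (i + 1) k))

theorem plain_one (pool : PySem.Dict String (List String)) (k : String) (hko : k ≠ "out") :
    plain pool 1 k = 0 := by
  simp [plain, if_neg hko]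

theorem init_good (pool : PySem.Dict String (List String)) :
    GoodB pool 0 (pool.keys.foldl (fun d k => d.insert k (0 : Int)) PySem.Dict.empty) := by
  constructor
  · intro k hk
    rw [get?_foldl_insert_fn pool.keys (fun _ => 0) PySem.Dict.empty k, if_neg hk]
    exact PySem.Dict.get?_empty k
  · intro k hk hko
    rw [get?_foldl_insert_fn pool.keys (fun _ => 0) PySem.Dict.empty k, if_pos hk,
      plain_one pool k hko]

theorem valB_eq_plain (pool : PySem.Dict String (List String)) (i : Nat)
    (d : PySem.Dict String Int) (hg : GoodB pool i d) (n : String) :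
    valB d n = plain pool (i + 1) n := by
  by_cases hn : n = "out"
  · subst hn; simp [valB, plain]
  · by_cases hk : n ∈ pool.keys
    · rw [valB, if_neg hn, PySem.Dict.getD_of_get?_eq_some d 0 (hg.2 n hk hn)]
    · have hnone := hg.1 n hk
      have hpnone : pool.get? n = none := (PySem.Dict.get?_eq_none_iff_not_mem_keys pool n).mpr hk
      rw [valB, if_neg hn, PySem.Dict.getD_of_get?_eq_none d 0 hnone]
      simp [plain, if_neg hn, PySem.Dict.getD_of_get?_eq_none pool [] hpnone]

theorem roundB_good (pool : PySem.Dict String (List String)) (i : Nat)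
    (d : PySem.Dict String Int) (hg : GoodB pool i d) :
    GoodB pool (i + 1) (roundB pool d) := by
  constructor
  · intro k hk
    unfold roundB
    rw [get?_foldl_insert_fn pool.keys _ PySem.Dict.empty k, if_neg hk]
    exact PySem.Dict.get?_empty k
  · intro k hk hko
    unfold roundB
    rw [get?_foldl_insert_fn pool.keys _ PySem.Dict.empty k, if_pos hk]
    congr 1
    have hplain : plain pool (i + 1 + 1) k =
        ((pool.getD k []).map (fun n => plain pool (i + 1) n)).sum := by
      simp only [plain, if_neg hko]
    rw [hplain]
    congr 1
    apply List.map_congr_left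
    intro n _
    exact valB_eq_plain pool i d hg n

theorem rounds_good (pool : PySem.Dict String (List String)) (init : PySem.Dict String Int)
    (h0 : GoodB pool 0 init) (m : Nat) :
    GoodB pool m ((List.range m).foldl (fun c _ => roundB pool c) init) := by
  induction m with
  | zero => simpa using h0
  | succ m ih =>
    rw [List.range_succ, List.foldl_append]
    exact roundB_good pool m _ ih

-- B's final value is plain (pool.size+1) "you"
theorem alt_eq_plain (grid : List String) :
    cnt_diff_paths_v1_alt grid = plain (buildPool grid) ((buildPool grid).size + 1) "you" := by
  unfold cnt_diff_paths_v1_alt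
  have hgood := rounds_good (buildPool grid) _ (init_good (buildPool grid)) (buildPool grid).size
  by_cases hk : "you" ∈ (buildPool grid).keys
  · rw [PySem.Dict.getD_of_get?_eq_some _ 0 (hgood.2 "you" hk (by decide))]
  · have hnone := hgood.1 "you" hk
    have hpnone : (buildPool grid).get? "you" = none :=
      (PySem.Dict.get?_eq_none_iff_not_mem_keys (buildPool grid) "you").mpr hk
    rw [PySem.Dict.getD_of_get?_eq_none _ 0 hnone]
    simp [plain, PySem.Dict.getD_of_get?_eq_none (buildPool grid) [] hpnone]

-- ===== VERDICT (by name: the statement is the Claim_ definition above) =====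
theorem cnt_diff_paths_v1_spec : Claim_equal_cnt_diff_paths_v1 := by
  intro grid _ hpre
  unfold Spec_cnt_diff_paths_v1
  obtain ⟨_, hac'⟩ := hpre
  have hac : Acyc (buildPool grid) := by
    intro k hk hr
    rw [List.all_eq_true] at hac'
    have := hac' k hk
    simp only [Bool.or_eq_true, Bool.not_eq_true'] at this
    rcases this with h | h
    · rw [hr] at h
      exact absurd h (by simp)
    · exact h
  have hpath : PathOK (buildPool grid) [] "you" :=
    ⟨List.nodup_nil, List.isChain_singleton "you", rfl⟩
  have hinv : InvA (buildPool grid) PySem.Dict.empty := by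
    intro k v hkv
    simp [PySem.Dict.get?_empty] at hkv
  have hA := dfsA_correct (buildPool grid) hac ((buildPool grid).size + 1) [] "you"
    PySem.Dict.empty hpath hinv (by simp)
  unfold cnt_diff_paths_v1
  rw [hA.1, alt_eq_plain grid]
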